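-- pv_equiv track=rewrite | github.com/SiddharthGianchandani/Face-Recognizer | real or fake image trainer.py | consider
-- ===== SOURCE A (Python) =====
-- def consider(loc,loc1):
--     for m1 in loc1:
--         temp=[]
--         for m in loc:
--             if (m[0]-30<=m1[0]<=m[0]+30)or(m[1]-30<=m1[1]<=m[1]+30)or(m[2]-30<=m1[2]<=m[2]+30)or(m[3]-30<=m1[3]<=m[3]+30):
--                 continue
--             temp.append(m)
--         loc=temp
--
--     for m in loc:
--         loc1.append(m)
--     return loc1
-- ===== SOURCE B (Python) =====
-- def _lower_bound(col, lo):
--     # first index i with col[i] >= lo in a sorted list, by binary search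
--     i, j = 0, len(col)
--     while i < j:
--         mid = (i + j) // 2
--         if col[mid] < lo:
--             i = mid + 1
--         else:
--             j = mid
--     return i
--
-- def _window_hit(col, x):
--     # does sorted col contain a value in [x-30, x+30]?
--     i = _lower_bound(col, x - 30)
--     return i < len(col) and col[i] <= x + 30
--
-- def consider(loc, loc1):
--     if loc and loc1:
--         cols = {}
--         def col(k):
--             # sorted k-th coordinates of loc1, built on first use
--             if k not in cols:
--                 cols[k] = sorted(m1[k] for m1 in loc1)
--             return cols[k]
--         survivors = [m for m in loc
--                      if not any(_window_hit(col(k), m[k]) for k in range(4))]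
--     else:
--         survivors = loc
--     loc1.extend(survivors)
--     return loc1
-- ===== Notes on version B (the rewrite author's own statement) =====
-- stated objective: alternative
-- what changed: Instead of one filtering pass over loc per reference box m1 (rebuilding loc m times), B sorts each needed coordinate column of loc1 once (lazily memoized) and decides each box's survival with binary searches (is some loc1 coordinate inside the +/-30 window), appending survivors in one pass; intended as asymptotically lighter (O((n+m) log m) work vs O(n*m) comparisons) but a timing run measured only 1.38x at the largest size, so no speed is claimed.
-- outside the precondition, e.g. on consider([[0, 0]], [[50, 0], [90]]): A returns [[50, 0], [90]], B raises IndexError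
import Mathlib
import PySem

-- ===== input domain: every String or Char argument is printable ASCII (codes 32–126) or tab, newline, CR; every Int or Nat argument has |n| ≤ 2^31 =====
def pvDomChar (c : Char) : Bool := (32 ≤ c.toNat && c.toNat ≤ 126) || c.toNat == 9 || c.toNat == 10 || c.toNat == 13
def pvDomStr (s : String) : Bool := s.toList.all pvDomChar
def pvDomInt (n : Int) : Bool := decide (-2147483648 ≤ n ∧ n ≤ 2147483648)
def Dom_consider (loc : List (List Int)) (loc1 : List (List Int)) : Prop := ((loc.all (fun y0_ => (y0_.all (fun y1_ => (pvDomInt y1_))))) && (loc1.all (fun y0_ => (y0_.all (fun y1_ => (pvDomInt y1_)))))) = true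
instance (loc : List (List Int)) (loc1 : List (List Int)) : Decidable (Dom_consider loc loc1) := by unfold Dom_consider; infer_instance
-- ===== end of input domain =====

-- B replaces A's per-reference-box filtering passes over loc with sorted coordinate
-- columns of loc1 (built lazily) plus binary search per box (objective: alternative
-- algorithm; not measured faster). A mutates loc1 in place (appends the survivors);
-- B performs the same mutation; the equivalence proved here is about the return value.

-- ===== PORT A =====
-- the if-condition of A's inner loop (m[k] indexing: in range under Pre_; getD used for totality)
def considerCond (m : List Int) (m1 : List Int) : Bool :=
  (decide (m.getD 0 0 - 30 ≤ m1.getD 0 0) && decide (m1.getD 0 0 ≤ m.getD 0 0 + 30)) ||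
  (decide (m.getD 1 0 - 30 ≤ m1.getD 1 0) && decide (m1.getD 1 0 ≤ m.getD 1 0 + 30)) ||
  (decide (m.getD 2 0 - 30 ≤ m1.getD 2 0) && decide (m1.getD 2 0 ≤ m.getD 2 0 + 30)) ||
  (decide (m.getD 3 0 - 30 ≤ m1.getD 3 0) && decide (m1.getD 3 0 ≤ m.getD 3 0 + 30))

def consider (loc : List (List Int)) (loc1 : List (List Int)) : List (List Int) :=
  -- for m1 in loc1: temp=[]; for m in loc: if cond: continue; temp.append(m); loc=temp
  let locF := loc1.foldl
    (fun lc m1 => lc.foldl (fun temp m => if considerCond m m1 then temp else temp ++ [m]) [])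
    loc
  -- for m in loc: loc1.append(m); return loc1
  loc1 ++ locF

-- ===== PORT B =====
-- _lower_bound: first index i with col[i] >= lo, binary search (the while loop of Source B)
def lowerBound (col : List Int) (lo : Int) (i j : Nat) : Nat :=
  if _h : i < j then
    let mid := (i + j) / 2
    if col.getD mid 0 < lo then lowerBound col lo (mid + 1) j
    else lowerBound col lo i mid
  else i
termination_by j - i
decreasing_by all_goals omega

-- _window_hit: does sorted col contain a value in [x-30, x+30]?
def windowHit (col : List Int) (x : Int) : Bool :=
  let i := lowerBound col (x - 30) 0 col.length
  decide (i < col.length) && decide (col.getD i 0 ≤ x + 30)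

-- col(k) of Source B: the sorted k-th coordinate column of loc1 (Source B's dict is a pure
-- memo cache built on first use; the port computes the same value directly)
def colOf (loc1 : List (List Int)) (k : Nat) : List Int :=
  PySem.List.sorted (loc1.map (fun m1 => m1.getD k 0)) (fun x => x) false

def consider_alt (loc : List (List Int)) (loc1 : List (List Int)) : List (List Int) :=
  if loc ≠ [] ∧ loc1 ≠ [] then
    let survivors := loc.filter
      (fun m => !((List.range 4).any (fun k => windowHit (colOf loc1 k) (m.getD k 0))))
    loc1 ++ survivors
  else loc1 ++ loc

-- ===== PRECONDITION & SPEC =====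
-- Pre_ excludes inputs containing a row shorter than 4, on which the Pythons may raise
-- IndexError, EXCEPT the degenerate cases where no index past 0 is ever read (either list
-- empty, or every loc box window-hit on coordinate 0 by the first loc1 box): on the excluded
-- inputs A raises unless boolean short-circuiting skips every missing index, and B's column
-- construction raises.
def Pre_consider (loc : List (List Int)) (loc1 : List (List Int)) : Prop :=
  loc = [] ∨ loc1 = [] ∨ ((∀ m ∈ loc, 4 ≤ m.length) ∧ (∀ m1 ∈ loc1, 4 ≤ m1.length)) ∨
    ((∀ m ∈ loc, 1 ≤ m.length) ∧ (∀ m1 ∈ loc1, 1 ≤ m1.length) ∧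
      (∀ m ∈ loc, m.getD 0 0 - 30 ≤ (loc1.headI).getD 0 0 ∧ (loc1.headI).getD 0 0 ≤ m.getD 0 0 + 30))
instance (loc : List (List Int)) (loc1 : List (List Int)) : Decidable (Pre_consider loc loc1) := by unfold Pre_consider; infer_instance

def pvWitness_consider : List (List Int) × List (List Int) :=
  ([[0, 0, 0, 0], [100, 100, 100, 100]], [[50, 50, 50, 50]])

def Spec_consider (loc : List (List Int)) (loc1 : List (List Int)) (out : List (List Int)) : Prop := out = consider_alt loc loc1
instance (loc : List (List Int)) (loc1 : List (List Int)) (out : List (List Int)) : Decidable (Spec_consider loc loc1 out) := by unfold Spec_consider; infer_instance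

-- ===== CLAIM (what is proved, stated in full; the proofs are below) =====
def Claim_equal_consider : Prop := ∀ (loc : List (List Int)) (loc1 : List (List Int)), Dom_consider loc loc1 → Pre_consider loc loc1 → Spec_consider loc loc1 (consider loc loc1)

-- ===== LEMMAS AND PROOFS =====

-- A's inner loop builds the filter of lc by the negated condition
theorem foldl_append_filter (lc : List (List Int)) (m1 : List Int) (acc : List (List Int)) :
    lc.foldl (fun temp m => if considerCond m m1 then temp else temp ++ [m]) acc
      = acc ++ lc.filter (fun m => !considerCond m m1) := by
  induction lc generalizing acc with
  | nil => simp
  | cons h t ih =>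
    simp only [List.foldl_cons, List.filter_cons]
    by_cases hc : considerCond h m1 = true
    · simp [hc, ih]
    · simp [hc, ih (acc ++ [h])]

-- A's outer loop over loc1 is one filter by the conjunction over loc1
theorem foldl_filter_all (loc1 loc : List (List Int)) :
    loc1.foldl
      (fun lc m1 => lc.foldl (fun temp m => if considerCond m m1 then temp else temp ++ [m]) [])
      loc
      = loc.filter (fun m => loc1.all (fun m1 => !considerCond m m1)) := by
  induction loc1 generalizing loc with
  | nil => simp
  | cons h t ih =>
    simp only [List.foldl_cons]
    rw [foldl_append_filter, List.nil_append, ih, List.filter_filter]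
    apply List.filter_congr
    intro a _
    simp [List.all_cons, Bool.and_comm]

-- monotone access into a sorted-by-≤ list
theorem pairwise_getD_mono (col : List Int) (hs : col.Pairwise (· ≤ ·))
    {a b : Nat} (hab : a ≤ b) (hb : b < col.length) :
    col.getD a 0 ≤ col.getD b 0 := by
  rcases Nat.lt_or_ge a b with h | h
  · have := (List.pairwise_iff_getElem.mp hs) a b (by omega) hb h
    simpa [List.getD_eq_getElem?_getD, List.getElem?_eq_getElem, hb, (by omega : a < col.length)] using this
  · have : a = b := by omega
    subst this; rfl

-- binary-search invariant: everything left of the result is < lo, everything at/after is ≥ lo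
theorem lowerBound_spec (col : List Int) (lo : Int) (hs : col.Pairwise (· ≤ ·)) :
    ∀ i j, i ≤ j → j ≤ col.length →
    (∀ k, k < i → col.getD k 0 < lo) →
    (∀ k, j ≤ k → k < col.length → lo ≤ col.getD k 0) →
    (∀ k, k < lowerBound col lo i j → col.getD k 0 < lo) ∧
    (∀ k, lowerBound col lo i j ≤ k → k < col.length → lo ≤ col.getD k 0) := by
  intro i j
  induction i, j using lowerBound.induct col lo with
  | case1 i j h mid hlt ih =>
    intro _ hj h1 h2
    rw [lowerBound, dif_pos h, if_pos (by simpa [mid] using hlt)]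
    refine ih (by omega) hj ?_ h2
    intro k hk
    rcases Nat.lt_or_ge k i with hk2 | hk2
    · exact h1 k hk2
    · calc col.getD k 0 ≤ col.getD mid 0 := pairwise_getD_mono col hs (by omega) (by omega)
        _ < lo := hlt
  | case2 i j h mid hge ih =>
    intro hij hj h1 h2
    rw [lowerBound, dif_pos h, if_neg (by simpa [mid] using hge)]
    refine ih (by omega) (by omega) h1 ?_
    intro k hk hklen
    calc lo ≤ col.getD mid 0 := by omega
      _ ≤ col.getD k 0 := pairwise_getD_mono col hs hk hklen
  | case3 i j h =>
    intro hij hj h1 h2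
    rw [lowerBound, dif_neg h]
    exact ⟨fun k hk => h1 k (by omega), fun k hk hklen => h2 k (by omega) hklen⟩

-- windowHit on a sorted column decides membership of the ±30 window
theorem windowHit_iff (col : List Int) (x : Int) (hs : col.Pairwise (· ≤ ·)) :
    windowHit col x = true ↔ ∃ y ∈ col, x - 30 ≤ y ∧ y ≤ x + 30 := by
  obtain ⟨hL, hR⟩ := lowerBound_spec col (x - 30) hs 0 col.length (Nat.zero_le _) le_rfl
    (by omega) (by omega)
  unfold windowHit
  constructor
  · intro h
    simp only [Bool.and_eq_true, decide_eq_true_eq] at h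
    obtain ⟨hlt, hle⟩ := h
    refine ⟨col.getD (lowerBound col (x - 30) 0 col.length) 0, ?_, hR _ le_rfl hlt, hle⟩
    rw [List.getD_eq_getElem?_getD, List.getElem?_eq_getElem hlt, Option.getD_some]
    exact List.getElem_mem _
  · rintro ⟨y, hy, hy1, hy2⟩
    obtain ⟨k, hk, rfl⟩ := List.getElem_of_mem hy
    have hkD : col.getD k 0 = col[k] := by
      rw [List.getD_eq_getElem?_getD, List.getElem?_eq_getElem hk, Option.getD_some]
    have hkr : lowerBound col (x - 30) 0 col.length ≤ k := by
      by_contra hlt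
      have := hL k (by omega); omega
    have hrlt : lowerBound col (x - 30) 0 col.length < col.length := by omega
    have := pairwise_getD_mono col hs hkr hk
    simp only [Bool.and_eq_true, decide_eq_true_eq]
    exact ⟨hrlt, by omega⟩

-- the column for coordinate k, and its characterisation
theorem windowHit_col (loc1 : List (List Int)) (k : Nat) (x : Int) :
    windowHit (colOf loc1 k) x = true
      ↔ ∃ m1 ∈ loc1, x - 30 ≤ m1.getD k 0 ∧ m1.getD k 0 ≤ x + 30 := by
  unfold colOf
  rw [windowHit_iff _ _ (by simpa using PySem.List.sorted_pairwise (loc1.map (fun m1 => m1.getD k 0)) (fun x => x))]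
  constructor
  · rintro ⟨y, hy, h1, h2⟩
    rw [PySem.List.mem_sorted, List.mem_map] at hy
    obtain ⟨m1, hm1, rfl⟩ := hy
    exact ⟨m1, hm1, h1, h2⟩
  · rintro ⟨m1, hm1, h1, h2⟩
    exact ⟨m1.getD k 0, by rw [PySem.List.mem_sorted]; exact List.mem_map.mpr ⟨m1, hm1, rfl⟩, h1, h2⟩

-- B's survival test for one box equals A's conjunction over loc1
theorem pred_eq (loc1 : List (List Int)) (m : List Int) :
    (!((List.range 4).any (fun k => windowHit (colOf loc1 k) (m.getD k 0))))
      = loc1.all (fun m1 => !considerCond m m1) := by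
  have hr : List.range 4 = [0, 1, 2, 3] := by decide
  simp only [hr, List.any_cons, List.any_nil, Bool.or_false]
  rw [Bool.eq_iff_iff]
  simp only [Bool.not_eq_true']
  simp only [Bool.or_eq_false_iff]
  simp only [Bool.eq_false_iff, ne_eq, windowHit_col]
  simp only [List.all_eq_true, Bool.not_eq_true']
  constructor
  · rintro ⟨h0, h1, h2, h3⟩ m1 hm1
    have n0 : ¬(m.getD 0 0 - 30 ≤ m1.getD 0 0 ∧ m1.getD 0 0 ≤ m.getD 0 0 + 30) :=
      fun ⟨a, b⟩ => h0 ⟨m1, hm1, by omega, by omega⟩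
    have n1 : ¬(m.getD 1 0 - 30 ≤ m1.getD 1 0 ∧ m1.getD 1 0 ≤ m.getD 1 0 + 30) :=
      fun ⟨a, b⟩ => h1 ⟨m1, hm1, by omega, by omega⟩
    have n2 : ¬(m.getD 2 0 - 30 ≤ m1.getD 2 0 ∧ m1.getD 2 0 ≤ m.getD 2 0 + 30) :=
      fun ⟨a, b⟩ => h2 ⟨m1, hm1, by omega, by omega⟩
    have n3 : ¬(m.getD 3 0 - 30 ≤ m1.getD 3 0 ∧ m1.getD 3 0 ≤ m.getD 3 0 + 30) :=
      fun ⟨a, b⟩ => h3 ⟨m1, hm1, by omega, by omega⟩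
    simp only [considerCond, Bool.or_eq_false_iff, Bool.and_eq_false_iff,
      decide_eq_false_iff_not, not_le]
    omega
  · intro h
    refine ⟨?_, ?_, ?_, ?_⟩ <;>
    · rintro ⟨m1, hm1, a, b⟩
      have := h m1 hm1
      simp only [considerCond, Bool.or_eq_false_iff, Bool.and_eq_false_iff,
        decide_eq_false_iff_not, not_le] at this
      omega

-- ===== VERDICT (by name: the statement is the Claim_ definition above) =====
theorem consider_spec : Claim_equal_consider := by
  intro loc loc1 _hdom _hpre
  show consider loc loc1 = consider_alt loc loc1
  have hA : consider loc loc1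
      = loc1 ++ loc.filter (fun m => loc1.all (fun m1 => !considerCond m m1)) := by
    unfold consider
    rw [foldl_filter_all]
  rw [hA]
  unfold consider_alt
  by_cases h : loc ≠ [] ∧ loc1 ≠ []
  · rw [if_pos h]
    refine congrArg (loc1 ++ ·) ?_
    refine List.filter_congr ?_
    intro m _
    exact (pred_eq loc1 m).symm
  · rw [if_neg h]
    rw [not_and_or, not_not, not_not] at h
    rcases h with hl | hl1
    · subst hl; simp
    · subst hl1; simp
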